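-- pv_equiv track=rewrite | github.com/KattiBrae/FPWS201819 | MA_FP/xrr/data/1diffus.py | fillYarray
-- ===== SOURCE A (Python) =====
-- def fillYarray(allecounts, channelabgeschnitten):
--     resultarr = []
--     for i in range(len(allecounts)):    # zählt den Index der Counts hoch
--         for j in range(len(channelabgeschnitten)):     # zählt den Index der abgeschnittenen Energie hoch
--             if ( i == channelabgeschnitten[j]):
--                 resultarr.append(allecounts[i])
--             else:
--                 pass
--     return(resultarr)
-- ===== SOURCE B (Python) =====
-- def fillYarray(allecounts, channelabgeschnitten):
--     mult = {}
--     for v in channelabgeschnitten: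
--         mult[v] = mult.get(v, 0) + 1
--     out = []
--     for i, c in enumerate(allecounts):
--         out.extend([c] * mult.get(i, 0))
--     return out
-- ===== Notes on version B (the rewrite author's own statement) =====
-- stated objective: faster
-- what changed: Replaces the nested index scan (for each count index, scan the whole channel list) by a one-pass multiplicity dictionary over the channel list followed by a single pass over the counts that appends each count by its multiplicity.
import Mathlib
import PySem

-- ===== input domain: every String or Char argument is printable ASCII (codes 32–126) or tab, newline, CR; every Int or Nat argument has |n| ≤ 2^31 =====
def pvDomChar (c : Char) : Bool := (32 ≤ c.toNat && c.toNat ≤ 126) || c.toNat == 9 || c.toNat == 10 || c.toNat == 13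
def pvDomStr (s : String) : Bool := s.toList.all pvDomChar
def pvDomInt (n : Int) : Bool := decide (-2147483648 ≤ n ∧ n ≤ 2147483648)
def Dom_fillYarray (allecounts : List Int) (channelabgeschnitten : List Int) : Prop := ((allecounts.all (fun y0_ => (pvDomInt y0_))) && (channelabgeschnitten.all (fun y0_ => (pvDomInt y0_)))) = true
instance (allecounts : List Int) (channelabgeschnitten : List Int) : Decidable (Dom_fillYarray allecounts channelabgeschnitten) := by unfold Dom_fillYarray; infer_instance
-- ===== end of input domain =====

-- B replaces A's nested index scan by a one-pass multiplicity dictionary plus a single pass over the counts (objective: faster, asymptotic).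


-- ===== PORT A =====
def fillYarray (allecounts : List Int) (channelabgeschnitten : List Int) : List Int :=
  (PySem.List.pyRange 0 (allecounts.length : Int) 1).foldl (fun resultarr i =>
    (PySem.List.pyRange 0 (channelabgeschnitten.length : Int) 1).foldl (fun res j =>
      if i = PySem.List.pyGetD channelabgeschnitten j 0 then
        res ++ [PySem.List.pyGetD allecounts i 0]
      else res) resultarr) []

-- ===== PORT B =====
def fillYarray_alt (allecounts : List Int) (channelabgeschnitten : List Int) : List Int :=
  let mult : PySem.Dict Int Int :=
    channelabgeschnitten.foldl (fun d v => d.insert v (d.getD v 0 + 1)) PySem.Dict.empty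
  (PySem.List.enumerate allecounts 0).foldl
    (fun out p => out ++ List.replicate (mult.getD p.1 0).toNat p.2) []

-- ===== PRECONDITION & SPEC =====
def Spec_fillYarray (allecounts : List Int) (channelabgeschnitten : List Int) (out : List Int) : Prop := out = fillYarray_alt allecounts channelabgeschnitten
instance (allecounts : List Int) (channelabgeschnitten : List Int) (out : List Int) : Decidable (Spec_fillYarray allecounts channelabgeschnitten out) := by unfold Spec_fillYarray; infer_instance

-- ===== CLAIM (what is proved, stated in full; the proofs are below) =====
def Claim_equal_fillYarray : Prop := ∀ (allecounts : List Int) (channelabgeschnitten : List Int), Dom_fillYarray allecounts channelabgeschnitten → Spec_fillYarray allecounts channelabgeschnitten (fillYarray allecounts channelabgeschnitten)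

-- ===== LEMMAS AND PROOFS =====

-- A's inner scan over the channel list appends allecounts[i] once per occurrence of i.
theorem inner_scan_eq_replicate (l : List Int) (i x : Int) (res : List Int) :
    l.foldl (fun r v => if i = v then r ++ [x] else r) res
      = res ++ List.replicate (l.count i) x := by
  induction l generalizing res with
  | nil => simp
  | cons v t ih =>
    have hrep : ∀ n : Nat, x :: List.replicate n x = List.replicate n x ++ [x] := fun n => by
      rw [← List.replicate_succ, List.replicate_succ']
    by_cases h : i = v
    · subst h
      simp [List.foldl_cons, ih, hrep, List.replicate_succ']
    · have hv : ¬ (v == i) = true := by simp [BEq.beq]; omega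
      simp [List.foldl_cons, h, ih, List.count_cons, hv]

theorem fillYarray_spec : Claim_equal_fillYarray := by
  intro ac ch _
  unfold Spec_fillYarray fillYarray fillYarray_alt
  rw [PySem.List.enumerate_eq_map_pyRange (d := 0), List.foldl_map]
  simp only [PySem.Dict.getD_foldl_insert_add_one, PySem.Dict.getD_empty, zero_add]
  simp only [PySem.List.len_eq, Int.toNat_natCast]
  congr 1
  funext res i
  rw [PySem.List.foldl_pyRange_zero_pyGetD' ch 0
        (fun r v => if i = v then r ++ [PySem.List.pyGetD ac i 0] else r) res,
      inner_scan_eq_replicate]
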